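-- pv_equiv track=rewrite | github.com/FREAD2025/ssafy-FREAD | analyses/utils/spellcheck_utils.py | split_text_for_hanspell
-- ===== SOURCE A (Python) =====
-- def split_text_for_hanspell(original_text, max_len=400):
--     """
--     hanspell의 글자 수 제한(500자)에 맞춰 텍스트를 분할합니다.
--     문장 종결 부호(.!?)를 우선으로 분할하고, 없으면 max_len에서 자릅니다.
--     """
--     text_to_split = original_text
--     text_list = []
--
--     start_index = 0
--
--     while start_index < len(text_to_split):  # 남은 텍스트가 있으면
--         # 남은 텍스트가 max_len보다 짧거나 같으면 그대로 추가
--         if len(text_to_split[start_index:]) <= max_len: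
--             text_list.append(text_to_split[start_index:])
--             break
--
--         # max_len 범위 내에서 문장 종결 부호 찾기
--         chunk_candidate = text_to_split[start_index : start_index + max_len]
--         sentence_break_last_index = -1
--
--         # 뒤에서부터 문장 종결 부호 검색
--         for i in range(len(chunk_candidate) - 1, -1, -1):
--             if chunk_candidate[i] in [".", "!", "?"]:
--                 sentence_break_last_index = i
--                 break
--
--         # 만약 문장 종결 부호를 찾았다면
--         if sentence_break_last_index != -1:
--             # 문장 종결 부호 기준으로 자르기
--             text_list.append(chunk_candidate[: sentence_break_last_index + 1])
--             start_index += (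
--                 sentence_break_last_index + 1
--             )  # 그 다음부터 다시 글자 수 확인
--         else:  # 문장 종결 부호가 없다면 max_len에서 자른 chunk_candidate 삽입
--             text_list.append(chunk_candidate)
--             start_index += max_len
--
--     return text_list
-- ===== SOURCE B (Python) =====
-- def split_text_for_hanspell(original_text, max_len=400):
--     """One pre-pass collects all sentence-break positions; the packing loop then
--     consumes them with a monotone pointer instead of rescanning each window
--     (a structurally different formulation of the same split)."""
--     text = original_text
--     n = len(text)
--     breaks = [i for i, ch in enumerate(text) if ch in ".!?"]
--     out = []
--     start = 0
--     j = 0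
--     while start < n:
--         if n - start <= max_len:
--             out.append(text[start:])
--             break
--         end = start + max_len - 1
--         while j < len(breaks) and breaks[j] < start:
--             j += 1
--         b = -1
--         while j < len(breaks) and breaks[j] <= end:
--             b = breaks[j]
--             j += 1
--         if b != -1:
--             out.append(text[start:b + 1])
--             start = b + 1
--         else:
--             out.append(text[start:start + max_len])
--             start += max_len
--     return out
-- ===== Notes on version B (the rewrite author's own statement) =====
-- stated objective: alternative
-- what changed: B precomputes the list of sentence-break positions in one pre-pass and the packing loop consumes it with a monotone pointer, replacing A's per-window backward character scan.
import Mathlib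
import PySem

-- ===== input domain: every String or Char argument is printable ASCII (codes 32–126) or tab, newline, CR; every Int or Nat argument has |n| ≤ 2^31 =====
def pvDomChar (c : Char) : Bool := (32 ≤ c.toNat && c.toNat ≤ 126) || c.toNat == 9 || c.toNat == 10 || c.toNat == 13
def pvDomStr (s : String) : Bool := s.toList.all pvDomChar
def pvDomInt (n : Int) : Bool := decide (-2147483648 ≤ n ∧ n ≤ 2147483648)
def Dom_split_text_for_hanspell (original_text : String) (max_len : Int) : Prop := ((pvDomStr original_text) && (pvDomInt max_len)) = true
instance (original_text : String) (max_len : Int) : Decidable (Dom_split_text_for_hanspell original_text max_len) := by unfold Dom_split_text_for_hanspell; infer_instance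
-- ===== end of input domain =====

-- B replaces A's per-window backward character scan by one pre-pass that lists all
-- sentence-break positions, consumed in order by a monotone pointer (objective: alternative).

-- ===== PORT A =====
def pvIsBreak (c : Char) : Bool := c = '.' || c = '!' || c = '?'

-- A's backward 'for i in range(len(chunk)-1, -1, -1)' scan with early break
def pvScanA (chunk : List Char) : Nat → Int
  | 0 => -1
  | j + 1 => if pvIsBreak (chunk.getD j ' ') then (j : Int) else pvScanA chunk j

-- A's while loop; fuel len(text)+1 covers every iteration (start grows by ≥ 1 per turn)
def pvLoopA (text : List Char) (maxLen : Int) : Nat → Int → List String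
  | 0, _ => []
  | f + 1, start =>
    if start < (text.length : Int) then
      if ((PySem.List.slice text (some start) none).length : Int) ≤ maxLen then
        [String.ofList (PySem.List.slice text (some start) none)]
      else
        let chunk := PySem.List.slice text (some start) (some (start + maxLen))
        let sb := pvScanA chunk chunk.length
        if sb ≠ -1 then
          String.ofList (PySem.List.slice chunk none (some (sb + 1))) ::
            pvLoopA text maxLen f (start + (sb + 1))
        else
          String.ofList chunk :: pvLoopA text maxLen f (start + maxLen)
    else []

def split_text_for_hanspell (original_text : String) (max_len : Int) : List String :=
  pvLoopA original_text.toList max_len (original_text.toList.length + 1) 0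

-- ===== PORT B =====
-- B's pre-pass: the positions of '.', '!', '?' (the comprehension over enumerate)
def pvBreaks (text : List Char) : List Int :=
  ((PySem.List.enumerate text 0).filter (fun p => pvIsBreak p.2)).map (·.1)

-- B's second inner while loop: consume the leading run ≤ e, remembering the last one in b
def pvGrab : List Int → Int → Int → Int × List Int
  | [], _, b => (b, [])
  | x :: xs, e, b => if x ≤ e then pvGrab xs e x else (b, x :: xs)

-- B's outer while loop; bs is the not-yet-consumed suffix of the break list (pointer j)
def pvLoopB (text : List Char) (maxLen : Int) : Nat → Int → List Int → List String
  | 0, _, _ => []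
  | f + 1, start, bs =>
    if start < (text.length : Int) then
      if (text.length : Int) - start ≤ maxLen then
        [String.ofList (PySem.List.slice text (some start) none)]
      else
        let bs1 := bs.dropWhile (· < start)
        let g := pvGrab bs1 (start + maxLen - 1) (-1)
        if g.1 ≠ -1 then
          String.ofList (PySem.List.slice text (some start) (some (g.1 + 1))) ::
            pvLoopB text maxLen f (g.1 + 1) g.2
        else
          String.ofList (PySem.List.slice text (some start) (some (start + maxLen))) ::
            pvLoopB text maxLen f (start + maxLen) g.2
    else []

def split_text_for_hanspell_alt (original_text : String) (max_len : Int) : List String :=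
  pvLoopB original_text.toList max_len (original_text.toList.length + 1) 0
    (pvBreaks original_text.toList)

-- ===== PRECONDITION & SPEC =====
-- Pre_ excludes max_len ≤ 0 with a nonempty text: there A's while loop never advances
-- (or walks backwards) and DIVERGES, returning nothing.
def Pre_split_text_for_hanspell (original_text : String) (max_len : Int) : Prop :=
  original_text = "" ∨ 1 ≤ max_len
instance (original_text : String) (max_len : Int) : Decidable (Pre_split_text_for_hanspell original_text max_len) := by unfold Pre_split_text_for_hanspell; infer_instance

def pvWitness_split_text_for_hanspell : String × Int := ("ab. cd! e", 4)

def Spec_split_text_for_hanspell (original_text : String) (max_len : Int) (out : List String) : Prop := out = split_text_for_hanspell_alt original_text max_len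
instance (original_text : String) (max_len : Int) (out : List String) : Decidable (Spec_split_text_for_hanspell original_text max_len out) := by unfold Spec_split_text_for_hanspell; infer_instance

-- ===== CLAIM (what is proved, stated in full; the proofs are below) =====
def Claim_equal_split_text_for_hanspell : Prop := ∀ (original_text : String) (max_len : Int), Dom_split_text_for_hanspell original_text max_len → Pre_split_text_for_hanspell original_text max_len → Spec_split_text_for_hanspell original_text max_len (split_text_for_hanspell original_text max_len)

-- ===== LEMMAS AND PROOFS =====

-- membership in the break-position list built from an arbitrary enumerate offset
lemma breaks_mem_aux (xs : List Char) : ∀ (s p : Int),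
    p ∈ ((PySem.List.enumerate xs s).filter (fun p => pvIsBreak p.2)).map (·.1) ↔
      ∃ k : Nat, k < xs.length ∧ p = s + k ∧ pvIsBreak (xs.getD k ' ') := by
  induction xs with
  | nil => intro s p; simp [PySem.List.enumerate_nil]
  | cons x xs ih =>
    intro s p
    simp only [PySem.List.enumerate_cons, List.filter_cons] at *
    constructor
    · intro h
      by_cases hx : pvIsBreak x
      · simp [hx] at h
        have ihs := ih (s+1) p
        simp at ihs
        rcases h with h | h
        · exact ⟨0, by simp, by omega, by simpa using hx⟩
        · rcases ihs.1 h with ⟨k, hk, hp, hb⟩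
          exact ⟨k+1, by simpa using hk, by push_cast; omega, by simpa using hb⟩
      · simp [hx] at h
        have ihs := ih (s+1) p
        simp at ihs
        rcases ihs.1 h with ⟨k, hk, hp, hb⟩
        exact ⟨k+1, by simpa using hk, by push_cast; omega, by simpa using hb⟩
    · rintro ⟨k, hk, hp, hb⟩
      match k with
      | 0 =>
        simp at hb hp
        simp [hb, hp]
      | k+1 =>
        have : p ∈ ((PySem.List.enumerate xs (s+1)).filter (fun p => pvIsBreak p.2)).map (·.1) :=
          (ih (s+1) p).2 ⟨k, by simpa using hk, by push_cast at hp ⊢; omega, by simpa using hb⟩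
        by_cases hx : pvIsBreak x <;> simp [hx] at this ⊢ <;> simp [this]

lemma breaks_mem (text : List Char) (p : Int) :
    p ∈ pvBreaks text ↔
      ∃ k : Nat, k < text.length ∧ p = (k : Int) ∧ pvIsBreak (text.getD k ' ') := by
  have := breaks_mem_aux text 0 p
  simpa [pvBreaks] using this

lemma breaks_lb (xs : List Char) (s : Int) :
    ∀ p ∈ ((PySem.List.enumerate xs s).filter (fun p => pvIsBreak p.2)).map (·.1), s ≤ p := by
  intro p hp
  rcases (breaks_mem_aux xs s p).1 hp with ⟨k, _, hp, _⟩
  omega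

lemma breaks_sorted_aux (xs : List Char) : ∀ (s : Int),
    (((PySem.List.enumerate xs s).filter (fun p => pvIsBreak p.2)).map (·.1)).Pairwise (· < ·) := by
  induction xs with
  | nil => intro s; simp [PySem.List.enumerate_nil]
  | cons x xs ih =>
    intro s
    simp only [PySem.List.enumerate_cons, List.filter_cons]
    by_cases hx : pvIsBreak x
    · simp only [hx, if_true]
      refine List.Pairwise.cons ?_ (ih (s+1))
      intro b hb
      have hlb := breaks_lb xs (s+1) b hb
      show s < b
      omega
    · simpa [hx] using ih (s+1)

lemma breaks_sorted (text : List Char) : (pvBreaks text).Pairwise (· < ·) :=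
  breaks_sorted_aux text 0

-- A's backward scan returns -1 exactly when no break occurs
lemma scanA_none (chunk : List Char) (i : Nat)
    (h : ∀ j, j < i → ¬ pvIsBreak (chunk.getD j ' ')) : pvScanA chunk i = -1 := by
  induction i with
  | zero => rfl
  | succ j ih =>
    simp only [pvScanA]
    rw [if_neg (h j (by omega))]
    exact ih (fun k hk => h k (by omega))

-- A's backward scan finds the greatest break index
lemma scanA_some (chunk : List Char) (i j : Nat) (hj : j < i)
    (hb : pvIsBreak (chunk.getD j ' '))
    (hmax : ∀ k, j < k → k < i → ¬ pvIsBreak (chunk.getD k ' ')) :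
    pvScanA chunk i = (j : Int) := by
  induction i with
  | zero => omega
  | succ n ih =>
    simp only [pvScanA]
    by_cases hjn : j = n
    · subst hjn; rw [if_pos hb]
    · rw [if_neg (hmax n (by omega) (by omega))]
      exact ih (by omega) (fun k hk1 hk2 => hmax k hk1 (by omega))

lemma grab_spec (l : List Int) : ∀ (e b : Int),
    pvGrab l e b = ((l.takeWhile (fun x => decide (x ≤ e))).foldl (fun _ x => x) b,
                    l.dropWhile (fun x => decide (x ≤ e))) := by
  induction l with
  | nil => intro e b; rfl
  | cons x xs ih =>
    intro e b
    by_cases hx : x ≤ e <;> simp [pvGrab, hx, ih]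

lemma chunk_getD (text : List Char) (s m' j : Nat) (hj : j < m') :
    ((text.drop s).take m').getD j ' ' = text.getD (s+j) ' ' := by
  simp [List.getD_eq_getElem?_getD, List.getElem?_take_of_lt hj, List.getElem?_drop]

lemma dropWhile_lb (l : List Int) (c : Int) (h : l.Pairwise (· < ·)) :
    ∀ x ∈ l.dropWhile (fun x => decide (x < c)), c ≤ x := by
  induction l with
  | nil => simp
  | cons a l ih =>
    intro x hx
    rw [List.dropWhile_cons] at hx
    by_cases ha : a < c
    · simp only [ha, decide_true, if_true] at hx
      exact ih (List.pairwise_cons.1 h).2 x hx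
    · simp only [ha, decide_false] at hx
      rcases List.mem_cons.1 hx with rfl | hx
      · omega
      · have := (List.pairwise_cons.1 h).1 x hx
        omega

lemma mem_takeWhile_of_sorted (l : List Int) (e p : Int) (h : l.Pairwise (· < ·))
    (hp : p ∈ l) (hpe : p ≤ e) : p ∈ l.takeWhile (fun x => decide (x ≤ e)) := by
  induction l with
  | nil => simp at hp
  | cons a l ih =>
    rcases List.mem_cons.1 hp with rfl | hp
    · simp [hpe]
    · have hap : a < p := (List.pairwise_cons.1 h).1 p hp
      have hae : a ≤ e := by omega
      simp only [List.takeWhile_cons, hae, decide_true, if_true]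
      exact List.mem_cons_of_mem _ (ih (List.pairwise_cons.1 h).2 hp)

lemma foldl_pick (l : List Int) : ∀ b : Int, l.foldl (fun _ x => x) b = l.getLastD b := by
  induction l with
  | nil => intro b; rfl
  | cons a l ih => intro b; simp only [List.foldl_cons]; rw [ih a, List.getLastD_cons]

lemma getLastD_max (l : List Int) (h : l.Pairwise (· ≤ ·)) (p : Int) (hp : p ∈ l) :
    ∀ d : Int, p ≤ l.getLastD d := by
  induction l with
  | nil => simp at hp
  | cons a l ih =>
    intro d
    rw [List.getLastD_cons]
    rcases List.mem_cons.1 hp with rfl | hp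
    · rcases l with _ | ⟨b, l'⟩
      · simp
      · have hmem : (b::l').getLastD p ∈ b::l' := by
          have : (b::l').getLastD p = (b::l').getLast (by simp) := by
            simp [List.getLastD_eq_getLast?, List.getLast?_eq_some_getLast]
          rw [this]; exact List.getLast_mem _
        exact (List.pairwise_cons.1 h).1 _ hmem
    · exact ih (List.pairwise_cons.1 h).2 hp a

lemma getLastD_mem (l : List Int) (hne : l ≠ []) (d : Int) : l.getLastD d ∈ l := by
  rcases l with _ | ⟨a, l⟩
  · simp at hne
  · have : (a::l).getLastD d = (a::l).getLast (by simp) := by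
      simp [List.getLastD_eq_getLast?, List.getLast?_eq_some_getLast]
    rw [this]; exact List.getLast_mem _

-- the main loop equality, by induction on the fuel
lemma loop_eq (text : List Char) (m : Int) (hm : 1 ≤ m) : ∀ (f : Nat),
    ∀ (start : Int) (pre bs : List Int), 0 ≤ start →
      pvBreaks text = pre ++ bs → (∀ x ∈ pre, x < start) →
      pvLoopA text m f start = pvLoopB text m f start bs := by
  intro f
  induction f with
  | zero => intro start pre bs _ _ _; rfl
  | succ f ih =>
    intro start pre bs h0 hsplit hpre
    simp only [pvLoopA, pvLoopB]
    by_cases hlt : start < (text.length : Int)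
    · rw [if_pos hlt, if_pos hlt]
      have hslice_from : PySem.List.slice text (some start) none = text.drop start.toNat :=
        PySem.List.slice_from text h0
      have hlen : (((text.drop start.toNat).length : Nat) : Int) = (text.length : Int) - start := by
        rw [List.length_drop]; omega
      by_cases hshort : (text.length : Int) - start ≤ m
      · rw [if_pos hshort, if_pos (by rw [hslice_from, hlen]; exact hshort)]
      · rw [if_neg hshort, if_neg (by rw [hslice_from, hlen]; exact hshort)]
        -- main case: a full window
        have hchunk : PySem.List.slice text (some start) (some (start + m)) =
            (text.drop start.toNat).take m.toNat := by
          rw [PySem.List.slice_toNat text h0 (by omega)]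
          congr 1
          omega
        have hchunklen : ((text.drop start.toNat).take m.toNat).length = m.toNat := by
          simp only [List.length_take, List.length_drop]
          omega
        have hsorted : (pvBreaks text).Pairwise (· < ·) := breaks_sorted text
        have hbs : bs.Pairwise (· < ·) := by
          rw [hsplit] at hsorted
          exact (List.pairwise_append.1 hsorted).2.1
        have hbs1 : (bs.dropWhile (fun x => decide (x < start))).Pairwise (· < ·) :=
          hbs.sublist (List.dropWhile_sublist _)
        have hbs1lb : ∀ x ∈ bs.dropWhile (fun x => decide (x < start)), start ≤ x :=
          dropWhile_lb bs start hbs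
        have hsplit1 : pvBreaks text =
            (pre ++ bs.takeWhile (fun x => decide (x < start))) ++
              bs.dropWhile (fun x => decide (x < start)) := by
          rw [hsplit, List.append_assoc, List.takeWhile_append_dropWhile]
        have hfront : ∀ x ∈ pre ++ bs.takeWhile (fun x => decide (x < start)), x < start := by
          intro x hx
          rcases List.mem_append.1 hx with hx | hx
          · exact hpre x hx
          · simpa using List.mem_takeWhile_imp hx
        have hwin : ∀ p : Int, start ≤ p → p ∈ pvBreaks text →
            p ∈ bs.dropWhile (fun x => decide (x < start)) := by
          intro p hp hmem
          rw [hsplit1] at hmem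
          rcases List.mem_append.1 hmem with hx | hx
          · exact absurd (hfront p hx) (by omega)
          · exact hx
        simp only [grab_spec, foldl_pick]
        set bs1 := bs.dropWhile (fun x => decide (x < start)) with hbs1def
        set tw := bs1.takeWhile (fun x => decide (x ≤ start + m - 1)) with htwdef
        have htw_decomp : tw ++ bs1.dropWhile (fun x => decide (x ≤ start + m - 1)) = bs1 :=
          List.takeWhile_append_dropWhile
        by_cases htw : tw = []
        · -- no sentence break in the window
          have hnone : pvScanA ((text.drop start.toNat).take m.toNat)
              ((text.drop start.toNat).take m.toNat).length = -1 := by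
            rw [hchunklen]
            apply scanA_none
            intro j hj hbrk
            rw [chunk_getD text start.toNat m.toNat j hj] at hbrk
            have hkn : start.toNat + j < text.length := by omega
            have hpmem : ((start.toNat + j : Nat) : Int) ∈ pvBreaks text :=
              (breaks_mem text _).2 ⟨start.toNat + j, hkn, rfl, hbrk⟩
            have hin : ((start.toNat + j : Nat) : Int) ∈ bs1 :=
              hwin _ (by push_cast; omega) hpmem
            have : ((start.toNat + j : Nat) : Int) ∈ tw :=
              mem_takeWhile_of_sorted bs1 (start + m - 1) _ hbs1 hin (by push_cast; omega)
            rw [htw] at this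
            simp at this
          rw [hchunk, hnone]
          rw [if_neg (by simp), if_neg (by rw [htw]; simp)]
          have hdrop_eq : bs1.dropWhile (fun x => decide (x ≤ start + m - 1)) = bs1 := by
            have h2 := htw_decomp
            rw [htw] at h2
            simpa using h2
          rw [hdrop_eq]
          exact congrArg (List.cons _) (ih (start + m) (pre ++ bs.takeWhile (fun x => decide (x < start))) bs1
            (by omega) hsplit1 (fun x hx => by have := hfront x hx; omega))
        · -- the window contains a break; b0 is the last one
          have htwsub : tw.Sublist bs1 := htwdef ▸ List.takeWhile_sublist _
          have htwsorted : tw.Pairwise (· < ·) := hbs1.sublist htwsub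
          set b0 := tw.getLastD (-1) with hb0def
          have hb0tw : b0 ∈ tw := getLastD_mem _ htw _
          have hb0bs1 : b0 ∈ bs1 := htwsub.mem hb0tw
          have hb0s : start ≤ b0 := hbs1lb _ hb0bs1
          have hb0e : b0 ≤ start + m - 1 := by
            have := List.mem_takeWhile_imp (htwdef ▸ hb0tw)
            simpa using this
          have hb0br : b0 ∈ pvBreaks text := by
            rw [hsplit1]
            exact List.mem_append.2 (Or.inr hb0bs1)
          rcases (breaks_mem text b0).1 hb0br with ⟨k, hkn, hbk, hkbr⟩
          have hks : start.toNat ≤ k := by omega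
          have hkj : k = start.toNat + (k - start.toNat) := by omega
          have hjm : k - start.toNat < m.toNat := by omega
          have hscan : pvScanA ((text.drop start.toNat).take m.toNat)
              ((text.drop start.toNat).take m.toNat).length = ((k - start.toNat : Nat) : Int) := by
            rw [hchunklen]
            apply scanA_some _ _ _ hjm
            · rw [chunk_getD text start.toNat m.toNat _ hjm, ← hkj]
              exact hkbr
            · intro k2 hk2l hk2u hbrk
              rw [chunk_getD text start.toNat m.toNat _ hk2u] at hbrk
              have hkn2 : start.toNat + k2 < text.length := by omega
              have hpmem : ((start.toNat + k2 : Nat) : Int) ∈ pvBreaks text :=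
                (breaks_mem text _).2 ⟨start.toNat + k2, hkn2, rfl, hbrk⟩
              have hin : ((start.toNat + k2 : Nat) : Int) ∈ bs1 :=
                hwin _ (by push_cast; omega) hpmem
              have hintw : ((start.toNat + k2 : Nat) : Int) ∈ tw :=
                mem_takeWhile_of_sorted bs1 (start + m - 1) _ hbs1 hin (by push_cast; omega)
              have := getLastD_max tw (htwsorted.imp le_of_lt) _ hintw (-1)
              rw [← hb0def] at this
              have : (start.toNat : Int) + k2 ≤ b0 := by push_cast at this ⊢; omega
              omega
          rw [hchunk, hscan]
          rw [if_pos (show ¬ ((k - start.toNat : Nat) : Int) = -1 by omega),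
              if_pos (show ¬ b0 = -1 by omega)]
          have hheadA : PySem.List.slice ((text.drop start.toNat).take m.toNat) none
              (some (((k - start.toNat : Nat) : Int) + 1)) =
              (text.drop start.toNat).take (k - start.toNat + 1) := by
            rw [show (((k - start.toNat : Nat) : Int) + 1) = (((k - start.toNat + 1 : Nat) : Nat) : Int) by push_cast; omega]
            rw [PySem.List.slice_to_natCast]
            rw [List.take_take]
            congr 1
            omega
          have hheadB : PySem.List.slice text (some start) (some (b0 + 1)) =
              (text.drop start.toNat).take (k - start.toNat + 1) := by
            rw [PySem.List.slice_toNat text h0 (by omega)]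
            congr 1
            omega
          rw [hheadA, hheadB]
          have hnext : start + (((k - start.toNat : Nat) : Int) + 1) = b0 + 1 := by omega
          rw [hnext]
          have hrest : pvBreaks text =
              ((pre ++ bs.takeWhile (fun x => decide (x < start))) ++ tw) ++
                bs1.dropWhile (fun x => decide (x ≤ start + m - 1)) := by
            rw [hsplit1]
            conv_lhs => rw [← htw_decomp]
            simp [List.append_assoc]
          refine congrArg (List.cons _) (ih (b0 + 1) _ _ (by omega) hrest ?_)
          intro x hx
          rcases List.mem_append.1 hx with hx | hx
          · have := hfront x hx
            omega
          · have := getLastD_max tw (htwsorted.imp le_of_lt) x hx (-1)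
            rw [← hb0def] at this
            omega
    · rw [if_neg hlt, if_neg hlt]

-- ===== VERDICT (by name: the statement is the Claim_ definition above) =====
theorem split_text_for_hanspell_spec : Claim_equal_split_text_for_hanspell := by
  intro t m _ hpre
  unfold Spec_split_text_for_hanspell split_text_for_hanspell split_text_for_hanspell_alt
  rcases hpre with h | h
  · subst h; rfl
  · exact loop_eq t.toList m h _ 0 [] (pvBreaks t.toList) le_rfl rfl (by simp)
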